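-- pv_equiv track=rewrite | github.com/pouyashaeri/LeetCode | SignalMinimumDelayStabilization.py | min_delay_stabilization
-- ===== SOURCE A (Python) =====
-- def min_delay_stabilization(data, D, W):
--     if not data or len(data) < 2:
--         return []
--
--     # Step 1: Build potential output transitions
--     transitions = []
--     previous_value = data[0][1]
--
--     for i in range(1, len(data)):
--         time = data[i][0]
--         value = data[i][1]
--
--         if value != previous_value:
--             transitions.append((time + D, value))
--             previous_value = value
--
--     result = []
--     i = 0
--
--     # Step 2: Sequential glitch filtering
--     while i < len(transitions):
--         current_time = transitions[i][0]
--
--         # If this is the last transition → it survives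
--         if i == len(transitions) - 1:
--             result.append((current_time, current_time + W))
--             break
--
--         next_time = transitions[i + 1][0]
--         duration = next_time - current_time
--
--         if duration >= W:
--             # Valid stable region
--             result.append((current_time, current_time + W))
--             i += 1
--         else:
--             # Glitch -> collapse this pulse
--             i += 2
--
--     return result
-- ===== SOURCE B (Python) =====
-- def min_delay_stabilization(data, D, W):
--     if not data or len(data) < 2:
--         return []
--     result = []
--     prev = data[0][1]
--     pending = None
--     for time, value in data[1:]:
--         if value != prev:
--             t = time + D
--             if pending is None:
--                 pending = t
--             elif t - pending >= W:
--                 result.append((pending, pending + W))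
--                 pending = t
--             else:
--                 pending = None
--             prev = value
--     if pending is not None:
--         result.append((pending, pending + W))
--     return result
-- ===== Notes on version B (the rewrite author's own statement) =====
-- stated objective: simpler
-- what changed: Replaced the two-phase build-transitions-list-then-index-scan with a single pass over data that maintains one pending transition time, emitting or dropping regions on the fly.
import Mathlib
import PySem

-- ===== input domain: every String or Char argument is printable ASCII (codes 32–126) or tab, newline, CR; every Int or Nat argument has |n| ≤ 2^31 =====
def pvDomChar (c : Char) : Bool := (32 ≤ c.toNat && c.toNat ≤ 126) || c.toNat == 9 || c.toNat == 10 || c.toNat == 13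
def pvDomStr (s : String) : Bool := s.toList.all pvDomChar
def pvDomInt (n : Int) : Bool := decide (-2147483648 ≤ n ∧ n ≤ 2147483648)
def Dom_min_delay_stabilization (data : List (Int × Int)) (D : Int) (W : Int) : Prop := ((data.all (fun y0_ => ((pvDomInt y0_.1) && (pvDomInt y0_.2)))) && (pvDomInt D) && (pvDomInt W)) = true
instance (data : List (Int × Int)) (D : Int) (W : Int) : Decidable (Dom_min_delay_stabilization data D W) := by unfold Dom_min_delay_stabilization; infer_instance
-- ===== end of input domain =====

-- B replaces A's build-transitions-then-scan with a single pass holding one pending transition (simpler decomposition, same cost).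

-- ===== PORT A =====
-- Step 1 loop: for each later sample, append (time+D, value) on a value change.
def mdsTransStep (D : Int) (st : List (Int × Int) × Int) (p : Int × Int) : List (Int × Int) × Int :=
  if p.2 ≠ st.2 then (st.1 ++ [(p.1 + D, p.2)], p.2) else st

-- Step 2 while-loop: last transition survives; gap ≥ W keeps current and advances one; a glitch skips two.
def mdsLoopA (W : Int) : List (Int × Int) → List (Int × Int)
  | [] => []
  | [t] => [(t.1, t.1 + W)]
  | t :: u :: rest =>
    if u.1 - t.1 ≥ W then (t.1, t.1 + W) :: mdsLoopA W (u :: rest)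
    else mdsLoopA W rest

def min_delay_stabilization (data : List (Int × Int)) (D : Int) (W : Int) : List (Int × Int) :=
  match data with
  | [] => []
  | [_] => []
  | d0 :: rest =>
    mdsLoopA W ((rest.foldl (mdsTransStep D) ([], d0.2)).1)

-- ===== PORT B =====
-- single-pass state: (previous value, pending transition time, emitted regions)
def mdsStepB (D W : Int) (st : Int × Option Int × List (Int × Int)) (p : Int × Int) :
    Int × Option Int × List (Int × Int) :=
  if p.2 ≠ st.1 then
    let t := p.1 + D
    match st.2.1 with
    | none => (p.2, some t, st.2.2)
    | some pt =>
      if t - pt ≥ W then (p.2, some t, st.2.2 ++ [(pt, pt + W)])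
      else (p.2, none, st.2.2)
  else st

def min_delay_stabilization_alt (data : List (Int × Int)) (D : Int) (W : Int) : List (Int × Int) :=
  match data with
  | d0 :: rest@(_ :: _) =>
    let st := rest.foldl (mdsStepB D W) (d0.2, none, [])
    match st.2.1 with
    | none => st.2.2
    | some pt => st.2.2 ++ [(pt, pt + W)]
  | _ => []

-- ===== PRECONDITION & SPEC =====
def Spec_min_delay_stabilization (data : List (Int × Int)) (D : Int) (W : Int) (out : List (Int × Int)) : Prop := out = min_delay_stabilization_alt data D W
instance (data : List (Int × Int)) (D : Int) (W : Int) (out : List (Int × Int)) : Decidable (Spec_min_delay_stabilization data D W out) := by unfold Spec_min_delay_stabilization; infer_instance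

-- ===== CLAIM (what is proved, stated in full; the proofs are below) =====
def Claim_equal_min_delay_stabilization : Prop := ∀ (data : List (Int × Int)) (D : Int) (W : Int), Dom_min_delay_stabilization data D W → Spec_min_delay_stabilization data D W (min_delay_stabilization data D W)

-- ===== LEMMAS AND PROOFS =====

-- the glitch automaton on transition TIMES, extracted from mdsStepB
def mdsAuto (W : Int) (s : Option Int × List (Int × Int)) (t : Int) : Option Int × List (Int × Int) :=
  match s.1 with
  | none => (some t, s.2)
  | some pt => if t - pt ≥ W then (some t, s.2 ++ [(pt, pt + W)]) else (none, s.2)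

def mdsFinish (W : Int) (s : Option Int × List (Int × Int)) : List (Int × Int) :=
  match s.1 with
  | none => s.2
  | some pt => s.2 ++ [(pt, pt + W)]

-- accumulator lemma for A's transition-building fold
theorem mdsTrans_acc (D : Int) (rest : List (Int × Int)) (ts0 : List (Int × Int)) (v0 : Int) :
    rest.foldl (mdsTransStep D) (ts0, v0)
      = (ts0 ++ (rest.foldl (mdsTransStep D) ([], v0)).1, (rest.foldl (mdsTransStep D) ([], v0)).2) := by
  induction rest generalizing ts0 v0 with
  | nil => simp
  | cons p r ih =>
    simp only [List.foldl_cons, mdsTransStep]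
    by_cases h : p.2 ≠ v0
    · simp only [if_pos h, List.nil_append]
      rw [ih (ts0 ++ [(p.1 + D, p.2)]) p.2, ih [(p.1 + D, p.2)] p.2]
      simp
    · simp only [if_neg h]
      exact ih ts0 v0

-- B's fold over samples = A's transition fold followed by the automaton fold
theorem mdsB_eq_auto (D W : Int) (rest : List (Int × Int)) (v0 : Int)
    (pend : Option Int) (acc : List (Int × Int)) :
    rest.foldl (mdsStepB D W) (v0, pend, acc)
      = ((rest.foldl (mdsTransStep D) ([], v0)).2,
         ((rest.foldl (mdsTransStep D) ([], v0)).1.map Prod.fst).foldl (mdsAuto W) (pend, acc)) := by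
  induction rest generalizing v0 pend acc with
  | nil => simp
  | cons p r ih =>
    simp only [List.foldl_cons, mdsStepB, mdsTransStep]
    by_cases h : p.2 ≠ v0
    · simp only [if_pos h, List.nil_append]
      rw [mdsTrans_acc D r [(p.1 + D, p.2)] p.2]
      simp only [List.cons_append, List.nil_append, List.map_cons, List.foldl_cons]
      cases pend with
      | none =>
        simp only [mdsAuto]
        exact ih p.2 (some (p.1 + D)) acc
      | some pt =>
        simp only [mdsAuto]
        by_cases hg : p.1 + D - pt ≥ W
        · simp only [if_pos hg]
          exact ih p.2 (some (p.1 + D)) (acc ++ [(pt, pt + W)])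
        · simp only [if_neg hg]
          exact ih p.2 none acc
    · simp only [if_neg h]
      exact ih v0 pend acc

-- the automaton fold, finished, computes A's sequential glitch filtering
theorem mdsAuto_eq_loopA (W : Int) (ts : List Int) :
    (∀ p acc, mdsFinish W (ts.foldl (mdsAuto W) (some p, acc))
        = acc ++ mdsLoopA W ((p, 0) :: ts.map (fun t => (t, 0)))) ∧
    (∀ acc, mdsFinish W (ts.foldl (mdsAuto W) (none, acc))
        = acc ++ mdsLoopA W (ts.map (fun t => (t, 0)))) := by
  induction ts with
  | nil => exact ⟨fun p acc => by simp [mdsFinish, mdsLoopA], fun acc => by simp [mdsFinish, mdsLoopA]⟩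
  | cons t r ih =>
    constructor
    · intro p acc
      simp only [List.foldl_cons, mdsAuto]
      by_cases hg : t - p ≥ W
      · simp only [hg, if_pos]
        rw [ih.1 t (acc ++ [(p, p + W)])]
        simp [mdsLoopA, hg]
      · simp only [if_neg hg]
        cases r with
        | nil => simpa [mdsLoopA, hg] using ih.2 acc
        | cons u r' => simpa [mdsLoopA, hg] using ih.2 acc
    · intro acc
      simp only [List.foldl_cons, mdsAuto, List.map_cons]
      exact ih.1 t acc

-- the glitch loop only looks at the first components
theorem mdsLoopA_map_fst (W : Int) (ts : List (Int × Int)) :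
    mdsLoopA W ((ts.map Prod.fst).map (fun t => (t, (0 : Int)))) = mdsLoopA W ts := by
  induction ts using mdsLoopA.induct W with
  | case1 => rfl
  | case2 t => simp [mdsLoopA]
  | case3 t u rest hg ih =>
    simp only [List.map_cons] at ih
    simp only [List.map_cons, mdsLoopA, hg, if_pos]
    rw [ih]
  | case4 t u rest hg ih =>
    simp only [List.map_cons, mdsLoopA, hg, ite_false]
    exact ih

-- ===== VERDICT (by name: the statement is the Claim_ definition above) =====
theorem min_delay_stabilization_spec : Claim_equal_min_delay_stabilization := by
  intro data D W _
  unfold Spec_min_delay_stabilization min_delay_stabilization min_delay_stabilization_alt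
  match data with
  | [] => rfl
  | [_] => rfl
  | d0 :: d1 :: rest =>
    simp only []
    rw [mdsB_eq_auto D W (d1 :: rest) d0.2 none []]
    show mdsLoopA W ((List.foldl (mdsTransStep D) ([], d0.2) (d1 :: rest)).1)
      = mdsFinish W (List.foldl (mdsAuto W) (none, [])
          (List.map Prod.fst (List.foldl (mdsTransStep D) ([], d0.2) (d1 :: rest)).1))
    have h2 := (mdsAuto_eq_loopA W (((d1 :: rest).foldl (mdsTransStep D) ([], d0.2)).1.map Prod.fst)).2 []
    simp only [List.nil_append] at h2
    rw [h2]
    exact (mdsLoopA_map_fst W _).symm
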